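-- pv_equiv track=rewrite | github.com/kpich/ace2004parse | parse_script/get_ace_char_offsets.py | remove_sgm_tags
-- ===== SOURCE A (Python) =====
-- def remove_sgm_tags(pretext):
--   cur = []
--   in_tag = False
--   for ch in pretext:
--     if ch == '<':
--       in_tag = True
--     if not in_tag:
--       cur.append(ch)
--     if ch == '>' and in_tag:
--       in_tag = False
--   return ''.join(cur)
-- ===== SOURCE B (Python) =====
-- def remove_sgm_tags(pretext):
--   parts = []
--   pos = 0
--   while True:
--     i = pretext.find('<', pos)
--     if i == -1:
--       parts.append(pretext[pos:])
--       break
--     parts.append(pretext[pos:i])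
--     j = pretext.find('>', i + 1)
--     if j == -1:
--       break
--     pos = j + 1
--   return ''.join(parts)
-- ===== Notes on version B (the rewrite author's own statement) =====
-- stated objective: faster
-- what changed: Replaced the per-character boolean state machine with segment scanning via str.find: copy the text up to each tag opener, skip to its closer, and drop an unclosed tail.
import Mathlib
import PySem

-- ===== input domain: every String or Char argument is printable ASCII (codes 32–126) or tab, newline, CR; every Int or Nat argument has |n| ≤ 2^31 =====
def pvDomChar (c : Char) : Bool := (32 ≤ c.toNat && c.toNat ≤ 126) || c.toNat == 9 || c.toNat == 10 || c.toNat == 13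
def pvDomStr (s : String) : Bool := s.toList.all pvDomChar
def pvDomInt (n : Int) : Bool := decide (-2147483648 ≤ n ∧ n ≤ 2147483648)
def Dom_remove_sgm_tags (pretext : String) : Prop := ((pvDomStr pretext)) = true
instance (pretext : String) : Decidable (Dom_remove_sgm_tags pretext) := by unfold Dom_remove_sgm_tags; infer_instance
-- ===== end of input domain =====

-- B replaces A's per-character boolean state machine by segment scanning (copy up to each
-- '<', skip to the matching '>', drop an unclosed tail); same return value, proved equal; measurably faster (C-level find/slicing vs per-char loop).

-- ===== PORT A =====
-- literal port of A's loop body: state (cur, in_tag), the three ifs in order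
def stepA (st : List Char × Bool) (ch : Char) : List Char × Bool :=
  let in_tag := if ch = '<' then true else st.2
  let cur := if !in_tag then st.1 ++ [ch] else st.1
  let in_tag' := if ch = '>' ∧ in_tag then false else in_tag
  (cur, in_tag')

def remove_sgm_tags (pretext : String) : String :=
  String.mk (pretext.toList.foldl stepA ([], false)).1

-- ===== PORT B =====
-- port of B's find-based loop on the remaining characters: takeWhile/dropWhile play the
-- role of pretext.find('<', pos) / find('>', i+1) (emptiness = find returned -1, .tail =
-- position j+1); the kept segments are concatenated.
def altGo (cs : List Char) : List Char :=
  let pre := cs.takeWhile (· ≠ '<')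
  let rest := cs.dropWhile (· ≠ '<')
  if rest = [] then pre                      -- no '<': keep the rest, stop
  else
    let rest2 := rest.tail.dropWhile (· ≠ '>')
    if rest2 = [] then pre                   -- unclosed tag: drop the tail
    else pre ++ altGo rest2.tail
termination_by cs.length
decreasing_by
  rename_i h1 h2
  show ((cs.dropWhile (· ≠ '<')).tail.dropWhile (· ≠ '>')).tail.length < cs.length
  have a1 : (cs.dropWhile (· ≠ '<')).length ≤ cs.length := List.length_dropWhile_le _ _
  have a2 : ((cs.dropWhile (· ≠ '<')).tail.dropWhile (· ≠ '>')).length ≤ (cs.dropWhile (· ≠ '<')).tail.length := List.length_dropWhile_le _ _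
  have n1 : 0 < (cs.dropWhile (· ≠ '<')).length := List.length_pos_of_ne_nil h1
  have n2 : 0 < ((cs.dropWhile (· ≠ '<')).tail.dropWhile (· ≠ '>')).length := List.length_pos_of_ne_nil h2
  have t1 : (cs.dropWhile (· ≠ '<')).tail.length = (cs.dropWhile (· ≠ '<')).length - 1 := List.length_tail
  have t2 : ((cs.dropWhile (· ≠ '<')).tail.dropWhile (· ≠ '>')).tail.length = ((cs.dropWhile (· ≠ '<')).tail.dropWhile (· ≠ '>')).length - 1 := List.length_tail
  omega

def remove_sgm_tags_alt (pretext : String) : String :=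
  String.mk (altGo pretext.toList)

-- ===== PRECONDITION & SPEC =====
def Spec_remove_sgm_tags (pretext : String) (out : String) : Prop := out = remove_sgm_tags_alt pretext
instance (pretext : String) (out : String) : Decidable (Spec_remove_sgm_tags pretext out) := by unfold Spec_remove_sgm_tags; infer_instance

-- ===== CLAIM (what is proved, stated in full; the proofs are below) =====
def Claim_equal_remove_sgm_tags : Prop := ∀ (pretext : String), Dom_remove_sgm_tags pretext → Spec_remove_sgm_tags pretext (remove_sgm_tags pretext)

-- ===== LEMMAS AND PROOFS =====

-- functional characterisation of A's state machine
def specA : List Char → Bool → List Char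
  | [], _ => []
  | c :: cs, false => if c = '<' then specA cs true else c :: specA cs false
  | c :: cs, true => if c = '>' then specA cs false else specA cs true

-- one step of A, computed
theorem stepA_false (acc : List Char) (c : Char) :
    stepA (acc, false) c = if c = '<' then (acc, true) else (acc ++ [c], false) := by
  by_cases hc : c = '<' <;> simp [stepA, hc]

theorem stepA_true (acc : List Char) (c : Char) :
    stepA (acc, true) c = (acc, if c = '>' then false else true) := by
  by_cases hg : c = '>' <;> simp [stepA, hg]

-- the A-side fold appends specA to the accumulator
theorem foldA_eq (cs : List Char) (acc : List Char) (t : Bool) :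
    (cs.foldl stepA (acc, t)).1 = acc ++ specA cs t := by
  induction cs generalizing acc t with
  | nil => simp [specA]
  | cons c cs ih =>
    rw [List.foldl_cons]
    cases t with
    | false =>
      rw [stepA_false]
      by_cases hc : c = '<'
      · simp [hc, ih, specA]
      · simp [hc, ih, specA]
    | true =>
      rw [stepA_true]
      by_cases hg : c = '>'
      · simp [hg, ih, specA]
      · simp [hg, ih, specA]

-- specA in the in-tag state: skip to the first '>' and continue after it
theorem specA_true_eq (cs : List Char) :
    specA cs true =
      if cs.dropWhile (· ≠ '>') = [] then []
      else specA (cs.dropWhile (· ≠ '>')).tail false := by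
  induction cs with
  | nil => simp [specA]
  | cons c cs ih =>
    by_cases hg : c = '>'
    · subst hg; simp [specA, List.dropWhile_cons]
    · simp [specA, hg, List.dropWhile_cons, ih]

-- altGo unfoldings
theorem altGo_nil : altGo [] = [] := by rw [altGo]; simp

theorem altGo_cons_ne (c : Char) (cs : List Char) (hc : c ≠ '<') :
    altGo (c :: cs) = c :: altGo cs := by
  rw [altGo, altGo]
  simp only [List.dropWhile_cons, List.takeWhile_cons, ne_eq, hc, decide_not]
  split_ifs <;> simp_all

theorem altGo_cons_lt (cs : List Char) :
    altGo ('<' :: cs) =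
      if cs.dropWhile (· ≠ '>') = [] then []
      else altGo (cs.dropWhile (· ≠ '>')).tail := by
  rw [altGo]
  simp [List.dropWhile_cons, List.takeWhile_cons]

theorem altGo_eq_specA_aux (n : ℕ) : ∀ cs : List Char, cs.length ≤ n → altGo cs = specA cs false := by
  induction n with
  | zero =>
    intro cs h
    have : cs = [] := List.eq_nil_of_length_eq_zero (Nat.le_zero.mp h)
    subst this; simpa [specA] using altGo_nil
  | succ n ih =>
    intro cs h
    cases cs with
    | nil => simpa [specA] using altGo_nil
    | cons c cs =>
      by_cases hc : c = '<'
      · subst hc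
        rw [altGo_cons_lt]
        have hlen : (cs.dropWhile (· ≠ '>')).length ≤ cs.length := List.length_dropWhile_le _ _
        have htl : (cs.dropWhile (· ≠ '>')).tail.length = (cs.dropWhile (· ≠ '>')).length - 1 := List.length_tail
        simp only [specA, if_pos rfl, specA_true_eq]
        by_cases h2 : cs.dropWhile (· ≠ '>') = []
        · rw [if_pos h2, if_pos h2]; simp
        · rw [if_neg h2, if_neg h2]
          simp only [if_true]
          simp at h
          exact ih _ (by omega)
      · rw [altGo_cons_ne c cs hc]
        simp at h
        rw [ih cs (by omega)]
        simp [specA, hc]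

theorem altGo_eq_specA (cs : List Char) : altGo cs = specA cs false :=
  altGo_eq_specA_aux cs.length cs le_rfl

-- ===== VERDICT (by name: the statement is the Claim_ definition above) =====
theorem remove_sgm_tags_spec : Claim_equal_remove_sgm_tags := by
  intro pretext _
  unfold Spec_remove_sgm_tags remove_sgm_tags remove_sgm_tags_alt
  rw [altGo_eq_specA, foldA_eq]
  simp
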